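-- pv_equiv track=rewrite | github.com/carranza96/vggt-hh | demo_colmap_HH_chunkedPC.py | create_image_chunks
-- ===== SOURCE A (Python) =====
-- def create_image_chunks(image_path_list, chunk_size, overlap):
--     """Create overlapping chunks of images for processing."""
--     chunks = []
--     step = chunk_size - overlap
--
--     if len(image_path_list) < chunk_size:
--         return [list(zip(image_path_list, range(len(image_path_list))))]
--
--     start_idx = 0
--     while True:
--         end_idx = min(start_idx + chunk_size, len(image_path_list))
--         if end_idx < start_idx + chunk_size and start_idx > 0:
--             start_idx = len(image_path_list) - chunk_size
--             end_idx = len(image_path_list)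
--
--         chunk_paths = image_path_list[start_idx:end_idx]
--         chunk_indices = list(range(start_idx, end_idx))
--         chunks.append(list(zip(chunk_paths, chunk_indices)))
--
--         if end_idx == len(image_path_list):
--             break
--         start_idx += step
--
--     return chunks
-- ===== SOURCE B (Python) =====
-- def create_image_chunks(image_path_list, chunk_size, overlap):
--     """Create overlapping chunks of images for processing."""
--     n = len(image_path_list)
--     if n < chunk_size:
--         return [list(zip(image_path_list, range(n)))]
--     step = chunk_size - overlap
--     # closed-form count of the regularly spaced chunks before the end-anchored one
--     num_inner = -(-(n - chunk_size) // step) if n > chunk_size else 0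
--     starts = [i * step for i in range(num_inner)] + [n - chunk_size]
--     return [list(zip(image_path_list[s:s + chunk_size], range(s, s + chunk_size)))
--             for s in starts]
-- ===== Notes on version B (the rewrite author's own statement) =====
-- stated objective: alternative
-- what changed: B computes the number of regularly spaced chunks in closed form with ceiling division and generates all start indices arithmetically (i*step plus the end-anchored final start), replacing A's stateful while-loop with its in-loop snap-and-break logic; no iteration-dependent state remains.
import Mathlib
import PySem

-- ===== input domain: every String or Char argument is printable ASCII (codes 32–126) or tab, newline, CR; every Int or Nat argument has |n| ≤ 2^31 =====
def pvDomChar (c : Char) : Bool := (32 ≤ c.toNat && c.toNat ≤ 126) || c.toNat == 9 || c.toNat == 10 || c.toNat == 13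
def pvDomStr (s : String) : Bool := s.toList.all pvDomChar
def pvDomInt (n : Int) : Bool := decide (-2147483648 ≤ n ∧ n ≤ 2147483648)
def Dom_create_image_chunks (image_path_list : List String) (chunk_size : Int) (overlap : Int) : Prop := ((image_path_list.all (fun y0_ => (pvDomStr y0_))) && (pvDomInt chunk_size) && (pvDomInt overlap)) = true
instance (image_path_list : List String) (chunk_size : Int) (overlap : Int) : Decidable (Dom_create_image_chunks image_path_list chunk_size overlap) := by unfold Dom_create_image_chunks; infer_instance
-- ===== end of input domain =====

-- B replaces A's stateful snap-and-break while-loop by a closed-form ceiling-division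
-- count of the regular chunks, generating every start index arithmetically
-- (objective: alternative). Equivalence is about the return value; no argument is mutated.

-- ===== PORT A =====
-- A's `while True` loop; fuel makes the same computation total (inside Pre_ the loop
-- terminates well before the fuel runs out).
def pvALoop (lst : List String) (n chunk step : Int) :
    Nat → Int → List (List (String × Int)) → List (List (String × Int))
  | 0, _, acc => acc.reverse
  | f + 1, start_idx, acc =>
    let end_idx := min (start_idx + chunk) n
    let start_idx' := if end_idx < start_idx + chunk ∧ 0 < start_idx then n - chunk else start_idx
    let end_idx' := if end_idx < start_idx + chunk ∧ 0 < start_idx then n else end_idx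
    let chunk_paths := PySem.List.slice lst (some start_idx') (some end_idx')
    let chunk_indices := PySem.List.pyRange start_idx' end_idx' 1
    let acc' := List.zip chunk_paths chunk_indices :: acc
    if end_idx' = n then acc'.reverse
    else pvALoop lst n chunk step f (start_idx' + step) acc'

def create_image_chunks (image_path_list : List String) (chunk_size : Int) (overlap : Int) : List (List (String × Int)) :=
  let n : Int := image_path_list.length
  let step := chunk_size - overlap
  if n < chunk_size then
    [List.zip image_path_list (PySem.List.pyRange 0 n 1)]
  else
    pvALoop image_path_list n chunk_size step
      (image_path_list.length + chunk_size.natAbs + 2) 0 []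

-- ===== PORT B =====
def create_image_chunks_alt (image_path_list : List String) (chunk_size : Int) (overlap : Int) : List (List (String × Int)) :=
  let n : Int := image_path_list.length
  if n < chunk_size then
    [List.zip image_path_list (PySem.List.pyRange 0 n 1)]
  else
    let step := chunk_size - overlap
    -- -(-(n - chunk_size) // step) if n > chunk_size else 0
    let num_inner : Int := if chunk_size < n then -(PySem.Int.floordiv (-(n - chunk_size)) step) else 0
    let starts := (PySem.List.pyRange 0 num_inner 1).map (fun i => i * step) ++ [n - chunk_size]
    starts.map (fun s =>
      List.zip (PySem.List.slice image_path_list (some s) (some (s + chunk_size)))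
        (PySem.List.pyRange s (s + chunk_size) 1))

-- ===== PRECONDITION & SPEC =====
-- Pre_ excludes exactly the inputs on which A's while-loop never terminates
-- (list longer than chunk_size with step = chunk_size - overlap ≤ 0); A returns
-- no value there.
def Pre_create_image_chunks (image_path_list : List String) (chunk_size : Int) (overlap : Int) : Prop :=
  (image_path_list.length : Int) ≤ chunk_size ∨ overlap < chunk_size
instance (image_path_list : List String) (chunk_size : Int) (overlap : Int) : Decidable (Pre_create_image_chunks image_path_list chunk_size overlap) := by unfold Pre_create_image_chunks; infer_instance

def pvWitness_create_image_chunks : List String × Int × Int := (["a", "b", "c", "d", "e"], 3, 1)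

def Spec_create_image_chunks (image_path_list : List String) (chunk_size : Int) (overlap : Int) (out : List (List (String × Int))) : Prop := out = create_image_chunks_alt image_path_list chunk_size overlap
instance (image_path_list : List String) (chunk_size : Int) (overlap : Int) (out : List (List (String × Int))) : Decidable (Spec_create_image_chunks image_path_list chunk_size overlap out) := by unfold Spec_create_image_chunks; infer_instance

-- ===== CLAIM (what is proved, stated in full; the proofs are below) =====
def Claim_equal_create_image_chunks : Prop := ∀ (image_path_list : List String) (chunk_size : Int) (overlap : Int), Dom_create_image_chunks image_path_list chunk_size overlap → Pre_create_image_chunks image_path_list chunk_size overlap → Spec_create_image_chunks image_path_list chunk_size overlap (create_image_chunks image_path_list chunk_size overlap)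

-- ===== LEMMAS AND PROOFS =====

-- The chunk materialized for a start index s.
def pvChunkOf (lst : List String) (chunk : Int) (s : Int) : List (String × Int) :=
  List.zip (PySem.List.slice lst (some s) (some (s + chunk)))
    (PySem.List.pyRange s (s + chunk) 1)

theorem pvChunkOf_eq (lst : List String) (chunk s e : Int) (h : s + chunk = e) :
    List.zip (PySem.List.slice lst (some s) (some e)) (PySem.List.pyRange s e 1) =
      pvChunkOf lst chunk s := by
  rw [pvChunkOf, h]

-- Proof-side description of the sequence of regular (non-final) start indices A visits.
def pvStarts (n chunk step : Int) : Nat → Int → List Int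
  | 0, _ => []
  | f + 1, s => if s + chunk < n then s :: pvStarts n chunk step f (s + step) else []

-- Core invariant: as long as the fuel dominates the remaining iterations (or the
-- very next iteration terminates), A's fused loop produces exactly the chunks of
-- the regular starts plus the final n - chunk start, appended after acc.
theorem pvALoop_eq (lst : List String) (chunk step : Int) :
    ∀ (f : Nat) (s : Int) (acc : List (List (String × Int))),
      0 ≤ s → chunk ≤ (lst.length : Int) →
      ((1 ≤ step ∧ (lst.length : Int) - chunk < s + (f : Int) * step) ∨
        (lst.length : Int) ≤ s + chunk) →
      pvALoop lst (lst.length : Int) chunk step (f + 1) s acc =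
        acc.reverse ++
          (pvStarts (lst.length : Int) chunk step (f + 1) s ++
            [(lst.length : Int) - chunk]).map (pvChunkOf lst chunk) := by
  intro f
  induction f with
  | zero =>
    intro s acc hs hcn hf
    have hterm : (lst.length : Int) ≤ s + chunk := by
      rcases hf with ⟨hstep, hlt⟩ | h
      · simp at hlt; omega
      · exact h
    by_cases heq : s + chunk = (lst.length : Int)
    · simp only [pvALoop, pvStarts]
      rw [min_eq_right (by omega)]
      have h1 : ¬((lst.length : Int) < s + chunk ∧ 0 < s) := by omega
      have h2 : ¬(s + chunk < (lst.length : Int)) := by omega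
      simp only [if_neg h1, if_neg h2]
      rw [pvChunkOf_eq lst chunk s (lst.length : Int) heq,
        show s = (lst.length : Int) - chunk by omega]
      simp
    · -- s + chunk > n, and since chunk ≤ n and 0 ≤ s we get 0 < s: snap.
      have hgt : (lst.length : Int) < s + chunk := by omega
      have hpos : 0 < s := by omega
      simp only [pvALoop, pvStarts]
      rw [min_eq_right (by omega)]
      have h2 : ¬(s + chunk < (lst.length : Int)) := by omega
      simp only [if_pos (And.intro hgt hpos), if_neg h2]
      rw [pvChunkOf_eq lst chunk ((lst.length : Int) - chunk) (lst.length : Int) (by omega)]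
      simp
  | succ f ih =>
    intro s acc hs hcn hf
    by_cases hlt : s + chunk < (lst.length : Int)
    · -- ordinary iteration: append chunkOf s, recurse at s + step
      have hfl : 1 ≤ step ∧ (lst.length : Int) - chunk < s + ((f : Int) + 1) * step := by
        rcases hf with h | h
        · refine ⟨h.1, ?_⟩
          have h2 := h.2; push_cast at h2; exact h2
        · exact absurd h (by omega)
      have hmain :
          pvALoop lst (lst.length : Int) chunk step (f + 1 + 1) s acc =
            pvALoop lst (lst.length : Int) chunk step (f + 1) (s + step)
              (pvChunkOf lst chunk s :: acc) := by
        simp only [pvALoop]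
        rw [min_eq_left (by omega)]
        have h1 : ¬(s + chunk < s + chunk ∧ 0 < s) := by omega
        have h2 : ¬(s + chunk = (lst.length : Int)) := by omega
        simp only [if_neg h1, if_neg h2, pvChunkOf]
      have hnext : (lst.length : Int) - chunk < (s + step) + (f : Int) * step := by
        have hr : ((f : Int) + 1) * step = (f : Int) * step + step := by ring
        have h2 := hfl.2
        linarith
      rw [hmain, ih (s + step) (pvChunkOf lst chunk s :: acc) (by omega) hcn
        (Or.inl ⟨hfl.1, hnext⟩)]
      have hb : pvStarts (lst.length : Int) chunk step (f + 1 + 1) s =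
          s :: pvStarts (lst.length : Int) chunk step (f + 1) (s + step) := by
        simp only [pvStarts, if_pos hlt]
      rw [hb]
      simp
    · -- next iteration terminates regardless of fuel: same as the base case.
      by_cases heq : s + chunk = (lst.length : Int)
      · simp only [pvALoop, pvStarts]
        rw [min_eq_right (by omega)]
        have h1 : ¬((lst.length : Int) < s + chunk ∧ 0 < s) := by omega
        simp only [if_neg h1, if_neg hlt]
        rw [pvChunkOf_eq lst chunk s (lst.length : Int) heq,
          show s = (lst.length : Int) - chunk by omega]
        simp
      · have hgt : (lst.length : Int) < s + chunk := by omega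
        have hpos : 0 < s := by omega
        simp only [pvALoop, pvStarts]
        rw [min_eq_right (by omega)]
        simp only [if_pos (And.intro hgt hpos), if_neg hlt]
        rw [pvChunkOf_eq lst chunk ((lst.length : Int) - chunk) (lst.length : Int) (by omega)]
        simp

-- The regular starts A visits are exactly the arithmetic progression 0, step, …
-- of length M, where M is characterized by the stopping condition.
theorem pvStarts_arith (n chunk step : Int) :
    ∀ (M : Nat) (f : Nat) (s : Int), M ≤ f →
      (∀ i : Nat, i < M → s + (i : Int) * step + chunk < n) →
      ¬(s + (M : Int) * step + chunk < n) →
      pvStarts n chunk step (f + 1) s = (List.range M).map (fun (i : Nat) => s + (i : Int) * step) := by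
  intro M
  induction M with
  | zero =>
    intro f s _ _ hM
    simp only [pvStarts]
    rw [if_neg (by simpa using hM)]
    simp
  | succ M ih =>
    intro f s hMf hall hM
    obtain ⟨f', rfl⟩ : ∃ f', f = f' + 1 := ⟨f - 1, by omega⟩
    have h0 : s + chunk < n := by simpa using hall 0 (by omega)
    rw [pvStarts, if_pos h0]
    rw [ih f' (s + step) (by omega)
      (fun i hi => by
        have := hall (i + 1) (by omega)
        push_cast at this ⊢; linarith)
      (by
        push_cast at hM ⊢; intro hc; exact hM (by linarith))]
    rw [List.range_succ_eq_map, List.map_cons, List.map_map]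
    refine List.cons_eq_cons.mpr ⟨by push_cast; ring, ?_⟩
    apply List.map_congr_left
    intro i _
    simp only [Function.comp_apply]
    push_cast; ring

-- ===== VERDICT (by name: the statement is the Claim_ definition above) =====
theorem create_image_chunks_spec : Claim_equal_create_image_chunks := by
  unfold Claim_equal_create_image_chunks Spec_create_image_chunks
  intro lst chunk ov _hdom hpre
  unfold create_image_chunks create_image_chunks_alt
  by_cases hlt : (lst.length : Int) < chunk
  · simp [hlt]
  · simp only [if_neg hlt]
    have hcn : chunk ≤ (lst.length : Int) := by omega
    have hfuel : lst.length + chunk.natAbs + 2 = (lst.length + chunk.natAbs + 1) + 1 := by omega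
    by_cases hgt : chunk < (lst.length : Int)
    · -- step ≥ 1 by Pre_
      have hstep : 1 ≤ chunk - ov := by
        rcases hpre with h | h
        · exact absurd h (by omega)
        · omega
      set q : Int := -(PySem.Int.floordiv (-((lst.length : Int) - chunk)) (chunk - ov)) with hq
      have hqspec : (q - 1) * (chunk - ov) < (lst.length : Int) - chunk ∧
          (lst.length : Int) - chunk ≤ q * (chunk - ov) :=
        (PySem.Int.neg_floordiv_neg_eq_iff_of_pos (by omega)).mp hq.symm
      have hq1 : 1 ≤ q := by nlinarith [hqspec.1, hqspec.2]
      have hq2 : q - 1 ≤ (q - 1) * (chunk - ov) :=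
        le_mul_of_one_le_right (by omega) hstep
      have hnc : (lst.length : Int) - chunk ≤ (lst.length : Int) + (chunk.natAbs : Int) := by
        omega
      have hqle : q ≤ (lst.length : Int) + (chunk.natAbs : Int) := by
        linarith [hq2, hqspec.1]
      rw [hfuel, pvALoop_eq lst chunk (chunk - ov) (lst.length + chunk.natAbs + 1) 0 []
        le_rfl hcn ?side]
      case side =>
        refine Or.inl ⟨hstep, ?_⟩
        have hF : (lst.length : Int) - chunk < ((lst.length + chunk.natAbs + 1 : Nat) : Int) := by
          omega
        nlinarith [hF, hstep, Int.natCast_nonneg (lst.length + chunk.natAbs + 1)]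
      rw [pvStarts_arith (lst.length : Int) chunk (chunk - ov) q.toNat
        (lst.length + chunk.natAbs + 1) 0
        (by omega)
        (fun i hi => by
          have hil : (i : Int) ≤ q - 1 := by omega
          have hmono : (i : Int) * (chunk - ov) ≤ (q - 1) * (chunk - ov) :=
            mul_le_mul_of_nonneg_right hil (by omega)
          have := hqspec.1; simp; linarith)
        (by
          have hc : (q.toNat : Int) = q := by omega
          rw [hc]; simp; linarith [hqspec.2])]
      simp only [if_pos hgt]
      simp only [pvChunkOf, PySem.List.pyRange_one, List.reverse_nil, List.nil_append,
        List.map_map, List.map_append, List.map_cons, List.map_nil, sub_zero]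
      refine congrArg₂ _ ?_ ?_
      · apply List.map_congr_left
        intro i _
        simp [pvChunkOf, PySem.List.pyRange_one, Function.comp]
      · simp
    · -- n = chunk: no regular starts, a single end-anchored chunk
      rw [hfuel, pvALoop_eq lst chunk (chunk - ov) (lst.length + chunk.natAbs + 1) 0 []
        le_rfl hcn (Or.inr (by omega))]
      rw [pvStarts_arith (lst.length : Int) chunk (chunk - ov) 0 (lst.length + chunk.natAbs + 1) 0
        (by omega) (by omega) (by simp; omega)]
      simp only [if_neg hgt]
      simp [pvChunkOf, PySem.List.pyRange_one_eq_nil]
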